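-- pv_equiv track=rewrite | github.com/GabeH169/popMachine | pythonClass/DailyHighsStudent.py | getOverUnder
-- ===== SOURCE A (Python) =====
-- def getOverUnder(overUnder, dailyHighs):
--     below = 0
--     equal = 0
--     above = 0
--     for month in dailyHighs:
--         for temp in month:
--             if temp < overUnder:
--                 below += 1
--             elif temp == overUnder:
--                 equal += 1
--             else:
--                 above += 1
--     return (below, equal, above)
-- ===== SOURCE B (Python) =====
-- def getOverUnder(overUnder, dailyHighs):
--     below = sum(temp < overUnder for month in dailyHighs for temp in month)
--     equal = sum(temp == overUnder for month in dailyHighs for temp in month)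
--     total = sum(len(month) for month in dailyHighs)
--     return (below, equal, total - below - equal)
-- ===== Notes on version B (the rewrite author's own statement) =====
-- stated objective: alternative
-- what changed: Replaces the per-element three-way branch with separate counting passes (below, equal) over the flattened data plus a length sum, deriving above by subtraction.
import Mathlib
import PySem

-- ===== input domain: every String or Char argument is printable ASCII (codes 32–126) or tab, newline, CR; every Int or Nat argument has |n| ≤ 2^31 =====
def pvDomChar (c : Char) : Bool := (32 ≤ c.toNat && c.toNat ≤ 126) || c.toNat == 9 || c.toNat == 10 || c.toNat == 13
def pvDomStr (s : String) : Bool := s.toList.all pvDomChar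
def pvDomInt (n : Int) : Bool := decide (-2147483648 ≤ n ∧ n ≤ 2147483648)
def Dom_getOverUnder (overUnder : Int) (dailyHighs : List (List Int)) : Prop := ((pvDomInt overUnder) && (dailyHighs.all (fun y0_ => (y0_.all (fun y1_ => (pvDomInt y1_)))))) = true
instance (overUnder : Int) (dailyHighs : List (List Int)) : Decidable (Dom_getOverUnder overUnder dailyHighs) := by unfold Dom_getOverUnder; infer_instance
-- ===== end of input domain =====

-- B computes below/equal by separate counting passes and derives above by subtraction; A uses one per-element three-way branch.

-- ===== PORT A =====
def getOverUnder (overUnder : Int) (dailyHighs : List (List Int)) : Int × Int × Int :=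
  let st := dailyHighs.foldl (fun (st : Int × Int × Int) month =>
    month.foldl (fun (st : Int × Int × Int) temp =>
      if temp < overUnder then (st.1 + 1, st.2.1, st.2.2)
      else if temp = overUnder then (st.1, st.2.1 + 1, st.2.2)
      else (st.1, st.2.1, st.2.2 + 1)) st) (0, 0, 0)
  (st.1, st.2.1, st.2.2)

-- ===== PORT B =====
def getOverUnder_alt (overUnder : Int) (dailyHighs : List (List Int)) : Int × Int × Int :=
  let below : Int := ((dailyHighs.flatMap id).countP (fun temp => temp < overUnder) : Nat)
  let equal : Int := ((dailyHighs.flatMap id).countP (fun temp => temp = overUnder) : Nat)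
  let total : Int := ((dailyHighs.map List.length).sum : Nat)
  (below, equal, total - below - equal)

-- ===== PRECONDITION & SPEC =====
def Spec_getOverUnder (overUnder : Int) (dailyHighs : List (List Int)) (out : Int × Int × Int) : Prop := out = getOverUnder_alt overUnder dailyHighs
instance (overUnder : Int) (dailyHighs : List (List Int)) (out : Int × Int × Int) : Decidable (Spec_getOverUnder overUnder dailyHighs out) := by unfold Spec_getOverUnder; infer_instance

-- ===== CLAIM (what is proved, stated in full; the proofs are below) =====
def Claim_equal_getOverUnder : Prop := ∀ (overUnder : Int) (dailyHighs : List (List Int)), Dom_getOverUnder overUnder dailyHighs → Spec_getOverUnder overUnder dailyHighs (getOverUnder overUnder dailyHighs)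

-- ===== LEMMAS AND PROOFS =====

theorem innerFold_char (overUnder : Int) (m : List Int) (st : Int × Int × Int) :
    m.foldl (fun (st : Int × Int × Int) temp =>
      if temp < overUnder then (st.1 + 1, st.2.1, st.2.2)
      else if temp = overUnder then (st.1, st.2.1 + 1, st.2.2)
      else (st.1, st.2.1, st.2.2 + 1)) st =
    (st.1 + (m.countP (fun t => t < overUnder) : Nat),
     st.2.1 + (m.countP (fun t => t = overUnder) : Nat),
     st.2.2 + ((m.length : Int) - (m.countP (fun t => t < overUnder) : Nat)
               - (m.countP (fun t => t = overUnder) : Nat))) := by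
  induction m generalizing st with
  | nil => simp
  | cons a m ih =>
      simp only [List.foldl_cons, List.countP_cons, List.length_cons, ih]
      by_cases h1 : a < overUnder
      · have h2 : ¬ a = overUnder := by omega
        refine Prod.ext ?_ (Prod.ext ?_ ?_) <;> simp [h1, h2] <;> omega
      · by_cases h2 : a = overUnder
        · refine Prod.ext ?_ (Prod.ext ?_ ?_) <;> simp [h1, h2] <;> omega
        · refine Prod.ext ?_ (Prod.ext ?_ ?_) <;> simp [h1, h2] <;> omega

theorem outerFold_char (overUnder : Int) (ds : List (List Int)) (st : Int × Int × Int) :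
    ds.foldl (fun (st : Int × Int × Int) month =>
      month.foldl (fun (st : Int × Int × Int) temp =>
        if temp < overUnder then (st.1 + 1, st.2.1, st.2.2)
        else if temp = overUnder then (st.1, st.2.1 + 1, st.2.2)
        else (st.1, st.2.1, st.2.2 + 1)) st) st =
    (st.1 + ((ds.flatMap id).countP (fun t => t < overUnder) : Nat),
     st.2.1 + ((ds.flatMap id).countP (fun t => t = overUnder) : Nat),
     st.2.2 + (((ds.map List.length).sum : Int)
               - ((ds.flatMap id).countP (fun t => t < overUnder) : Nat)
               - ((ds.flatMap id).countP (fun t => t = overUnder) : Nat))) := by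
  induction ds generalizing st with
  | nil => simp
  | cons m ds ih =>
      rw [List.foldl_cons, innerFold_char, ih]
      simp only [List.flatMap_cons, List.map_cons, List.countP_append, List.sum_cons, id,
        Prod.mk.injEq]
      refine ⟨by push_cast; ring, by push_cast; ring, by push_cast; ring⟩

-- ===== VERDICT (by name: the statement is the Claim_ definition above) =====
theorem getOverUnder_spec : Claim_equal_getOverUnder := by
  intro overUnder dailyHighs _
  show _ = _
  simp only [getOverUnder, getOverUnder_alt, outerFold_char]
  norm_num
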